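-- pv_equiv track=rewrite | github.com/chris-eleven0111/Downgraded-print-function-and-trashy-function | 실험실.py | upanddown
-- ===== SOURCE A (Python) =====
-- def upanddown(string, mode):
--
--     string_list = list(string)
--     sample = 0
--
--     if mode == 1:
--         for i in range(0, len(string)):
--             if i % 2 == 0:
--                 sample = string_list[i]
--                 string_list[i] = sample.upper()
--             elif i % 2 == 1:
--                 sample = string_list[i]
--                 string_list[i] = sample.lower()
--     if mode == 0:
--         for i in range(0, len(string)):
--             if i % 2 == 1:
--                 sample = string_list[i]
--                 string_list[i] = sample.upper()
--             elif i % 2 == 0: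
--                 sample = string_list[i]
--                 string_list[i] = sample.lower()
--     new_string = ''.join(string_list)
--     return new_string.replace("mnbzxc", "")
-- ===== SOURCE B (Python) =====
-- def upanddown(string, mode):
--     if mode == 1:
--         f, g = str.upper, str.lower
--     elif mode == 0:
--         f, g = str.lower, str.upper
--     else:
--         f = g = (lambda c: c)
--     out = []
--     it = iter(string)
--     for c1 in it:
--         out.append(f(c1))
--         c2 = next(it, None)
--         if c2 is None:
--             break
--         out.append(g(c2))
--     return ''.join(out).replace("mnbzxc", "")
-- ===== Notes on version B (the rewrite author's own statement) =====
-- stated objective: simpler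
-- what changed: Replaces A's two index-based loops with per-index parity tests and in-place list assignment by a single pass that consumes characters two at a time, applying the mode-selected pair of case functions; no index arithmetic or list mutation remains.
import Mathlib
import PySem

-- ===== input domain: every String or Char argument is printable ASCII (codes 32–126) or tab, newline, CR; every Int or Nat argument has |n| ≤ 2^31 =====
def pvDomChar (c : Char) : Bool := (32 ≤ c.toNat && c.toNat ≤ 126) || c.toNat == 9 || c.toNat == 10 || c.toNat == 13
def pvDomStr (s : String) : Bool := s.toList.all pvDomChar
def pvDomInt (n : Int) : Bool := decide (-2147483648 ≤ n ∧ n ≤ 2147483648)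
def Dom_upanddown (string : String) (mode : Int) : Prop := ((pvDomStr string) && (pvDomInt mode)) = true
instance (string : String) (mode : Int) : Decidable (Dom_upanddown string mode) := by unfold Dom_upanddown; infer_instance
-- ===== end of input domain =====

-- B replaces A's index loop (parity test + in-place assignment per index) by a direct
-- two-at-a-time recursion over the characters with the mode-selected pair of case maps: simpler.

-- ===== PORT A =====
-- literal port: list(string); two sequential 'if mode == …' index loops mutating the list;
-- ''.join; .replace("mnbzxc",""). (.upper()/.lower() on one char = upperChar/lowerChar, exact on ASCII)
def upanddown (string : String) (mode : Int) : String :=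
  let string_list := string.toList
  let string_list1 :=
    if mode = 1 then
      (PySem.List.pyRange 0 (string.toList.length : Int) 1).foldl (fun l i =>
        if PySem.Int.mod i 2 = 0 then
          PySem.List.pySetD l i (PySem.Chars.upperChar (PySem.List.pyGetD l i ' '))
        else if PySem.Int.mod i 2 = 1 then
          PySem.List.pySetD l i (PySem.Chars.lowerChar (PySem.List.pyGetD l i ' '))
        else l) string_list
    else string_list
  let string_list2 :=
    if mode = 0 then
      (PySem.List.pyRange 0 (string.toList.length : Int) 1).foldl (fun l i =>
        if PySem.Int.mod i 2 = 1 then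
          PySem.List.pySetD l i (PySem.Chars.upperChar (PySem.List.pyGetD l i ' '))
        else if PySem.Int.mod i 2 = 0 then
          PySem.List.pySetD l i (PySem.Chars.lowerChar (PySem.List.pyGetD l i ' '))
        else l) string_list1
    else string_list1
  let new_string := String.ofList string_list2
  PySem.Str.replace new_string "mnbzxc" ""

-- ===== PORT B =====
-- pairs(cs): consume two characters at a time, applying f to the first and g to the second
def pairsUD (f g : Char → Char) : List Char → List Char
  | [] => []
  | [c] => [f c]
  | c1 :: c2 :: rest => f c1 :: g c2 :: pairsUD f g rest

def upanddown_alt (string : String) (mode : Int) : String :=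
  let f := if mode = 1 then PySem.Chars.upperChar
           else if mode = 0 then PySem.Chars.lowerChar else fun c => c
  let g := if mode = 1 then PySem.Chars.lowerChar
           else if mode = 0 then PySem.Chars.upperChar else fun c => c
  PySem.Str.replace (String.ofList (pairsUD f g string.toList)) "mnbzxc" ""

-- ===== PRECONDITION & SPEC =====
def Spec_upanddown (string : String) (mode : Int) (out : String) : Prop := out = upanddown_alt string mode
instance (string : String) (mode : Int) (out : String) : Decidable (Spec_upanddown string mode out) := by unfold Spec_upanddown; infer_instance

-- ===== CLAIM (what is proved, stated in full; the proofs are below) =====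
def Claim_equal_upanddown : Prop := ∀ (string : String) (mode : Int), Dom_upanddown string mode → Spec_upanddown string mode (upanddown string mode)

-- ===== LEMMAS AND PROOFS =====

theorem pvMod2 (i : Int) : PySem.Int.mod i 2 = 0 ∨ PySem.Int.mod i 2 = 1 := by
  rw [PySem.Int.mod_eq_emod_of_pos (by norm_num)]
  omega

theorem pvSetAppend (v : Char) : ∀ (pre : List Char) (c : Char) (post : List Char),
    (pre ++ c :: post).set pre.length v = pre ++ v :: post := by
  intro pre
  induction pre with
  | nil => intro c post; rfl
  | cons a t ih => intro c post; simp [ih]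

theorem pvFoldlSetIdx (h : Int → Char → Char) : ∀ (post pre : List Char),
    (PySem.List.pyRange (pre.length : Int) ((pre.length : Int) + post.length) 1).foldl
      (fun l i => PySem.List.pySetD l i (h i (PySem.List.pyGetD l i ' '))) (pre ++ post)
    = pre ++ post.mapIdx (fun k c => h ((pre.length : Int) + k) c) := by
  intro post
  induction post with
  | nil =>
      intro pre
      rw [PySem.List.pyRange_one_eq_nil (by simp)]
      simp
  | cons c rest ih =>
      intro pre
      have hlt : (pre.length : Int) < (pre.length : Int) + (c :: rest).length := by
        simp
      rw [PySem.List.pyRange_one_cons hlt, List.foldl_cons]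
      have hget : PySem.List.pyGetD (pre ++ c :: rest) (pre.length : Int) ' ' = c := by
        rw [PySem.List.pyGetD_natCast]
        simp [List.getD]
      have hset : PySem.List.pySetD (pre ++ c :: rest) (pre.length : Int)
          (h (pre.length : Int) c) = pre ++ h (pre.length : Int) c :: rest := by
        rw [PySem.List.pySetD_natCast, pvSetAppend]
      rw [hget, hset]
      rw [show pre ++ h (pre.length : Int) c :: rest
            = (pre ++ [h (pre.length : Int) c]) ++ rest by simp]
      rw [show ((pre.length : Int) + ((c :: rest).length : Int))
            = (((pre ++ [h (pre.length : Int) c]).length : Int)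
               + (rest.length : Int)) by simp; ring]
      rw [show ((pre.length : Int) + 1) = ((pre ++ [h (pre.length : Int) c]).length : Int) by
            simp]
      rw [ih (pre ++ [h (pre.length : Int) c])]
      rw [List.mapIdx_cons]
      have hfun : (fun (k : Nat) (c' : Char) =>
            h (((pre ++ [h (pre.length : Int) c]).length : Int) + k) c')
          = fun (k : Nat) (c' : Char) => h ((pre.length : Int) + ((k + 1 : Nat) : Int)) c' := by
        funext k c'
        congr 1
        push_cast
        simp
        ring
      rw [hfun]
      simp

theorem pvPairs (f g : Char → Char) : ∀ (l : List Char),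
    pairsUD f g l = l.mapIdx (fun k c => if k % 2 = 0 then f c else g c) := by
  intro l
  induction l using pairsUD.induct with
  | case1 => rfl
  | case2 c => rfl
  | case3 c1 c2 rest ih =>
      rw [pairsUD, ih, List.mapIdx_cons, List.mapIdx_cons]
      norm_num
      apply congrArg (fun F => List.mapIdx F rest)
      funext k c
      have hk : (k + 1 + 1) % 2 = k % 2 := by omega
      simp [hk]

theorem pvLoopEq (f g : Char → Char) (l : List Char) :
    (PySem.List.pyRange 0 (l.length : Int) 1).foldl (fun acc i =>
        if PySem.Int.mod i 2 = 0 then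
          PySem.List.pySetD acc i (f (PySem.List.pyGetD acc i ' '))
        else if PySem.Int.mod i 2 = 1 then
          PySem.List.pySetD acc i (g (PySem.List.pyGetD acc i ' '))
        else acc) l
    = pairsUD f g l := by
  have hfun : (fun (acc : List Char) (i : Int) =>
        if PySem.Int.mod i 2 = 0 then
          PySem.List.pySetD acc i (f (PySem.List.pyGetD acc i ' '))
        else if PySem.Int.mod i 2 = 1 then
          PySem.List.pySetD acc i (g (PySem.List.pyGetD acc i ' '))
        else acc)
      = (fun (acc : List Char) (i : Int) =>
          PySem.List.pySetD acc i ((fun (j : Int) (c : Char) =>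
            if PySem.Int.mod j 2 = 0 then f c else g c) i (PySem.List.pyGetD acc i ' '))) := by
    funext acc i
    rcases pvMod2 i with hm | hm <;> simp only [hm] <;> norm_num
  rw [hfun]
  have h0 := pvFoldlSetIdx (fun (j : Int) (c : Char) =>
      if PySem.Int.mod j 2 = 0 then f c else g c) l []
  simp only [List.length_nil, Nat.cast_zero, List.nil_append, zero_add] at h0
  rw [h0, pvPairs]
  have hc : (fun (k : Nat) (c : Char) =>
        if PySem.Int.mod ((k : Int)) 2 = 0 then f c else g c)
      = fun (k : Nat) (c : Char) => if k % 2 = 0 then f c else g c := by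
    funext k c
    have hm : PySem.Int.mod ((k : Int)) 2 = ((k % 2 : Nat) : Int) := by
      rw [PySem.Int.mod_eq_emod_of_pos (by norm_num)]
      omega
    rw [hm]
    by_cases hk : k % 2 = 0
    · rw [if_pos (by exact_mod_cast congrArg (Nat.cast : Nat → Int) hk), if_pos hk]
    · rw [if_neg (by exact_mod_cast fun hz => hk (by exact_mod_cast hz)), if_neg hk]
  rw [hc]

theorem pvLoopEq' (f g : Char → Char) (l : List Char) :
    (PySem.List.pyRange 0 (l.length : Int) 1).foldl (fun acc i =>
        if PySem.Int.mod i 2 = 1 then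
          PySem.List.pySetD acc i (g (PySem.List.pyGetD acc i ' '))
        else if PySem.Int.mod i 2 = 0 then
          PySem.List.pySetD acc i (f (PySem.List.pyGetD acc i ' '))
        else acc) l
    = pairsUD f g l := by
  have hfun : (fun (acc : List Char) (i : Int) =>
        if PySem.Int.mod i 2 = 1 then
          PySem.List.pySetD acc i (g (PySem.List.pyGetD acc i ' '))
        else if PySem.Int.mod i 2 = 0 then
          PySem.List.pySetD acc i (f (PySem.List.pyGetD acc i ' '))
        else acc)
      = (fun (acc : List Char) (i : Int) =>
        if PySem.Int.mod i 2 = 0 then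
          PySem.List.pySetD acc i (f (PySem.List.pyGetD acc i ' '))
        else if PySem.Int.mod i 2 = 1 then
          PySem.List.pySetD acc i (g (PySem.List.pyGetD acc i ' '))
        else acc) := by
    funext acc i
    rcases pvMod2 i with hm | hm <;> simp only [hm] <;> norm_num
  rw [hfun, pvLoopEq]

theorem pvPairsId : ∀ (l : List Char), pairsUD (fun c => c) (fun c => c) l = l := by
  intro l
  induction l using pairsUD.induct with
  | case1 => rfl
  | case2 c => rfl
  | case3 c1 c2 rest ih => rw [pairsUD, ih]

-- ===== VERDICT (by name: the statement is the Claim_ definition above) =====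
theorem upanddown_spec : Claim_equal_upanddown := by
  intro string mode _
  show upanddown string mode = upanddown_alt string mode
  simp only [upanddown, upanddown_alt]
  by_cases h1 : mode = 1
  · rw [if_pos h1, if_neg (by omega), if_pos h1, if_pos h1,
        pvLoopEq PySem.Chars.upperChar PySem.Chars.lowerChar]
  · by_cases h0 : mode = 0
    · rw [if_neg h1, if_pos h0, if_neg h1, if_pos h0, if_neg h1, if_pos h0,
          pvLoopEq' PySem.Chars.lowerChar PySem.Chars.upperChar]
    · rw [if_neg h1, if_neg h0, if_neg h1, if_neg h0, if_neg h1, if_neg h0, pvPairsId]
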